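-- pv_equiv track=rewrite | github.com/JochiRaider/purple-axiom | tests/fixtures/duckDB_pySig/gap_03_08/draft_run_gap_validation.py | extract_tests
-- ===== SOURCE A (Python) =====
-- def extract_tests(sql: str) -> list[tuple[str, str]]:
--     """Extract individual tests from SQL file.
--
--     Tests are delimited by lines starting with '-- TEST N:'
--     and end at the next test or end of file.
--     """
--     tests = []
--     current_name = None
--     current_sql = []
--
--     for line in sql.split('\n'):
--         if line.startswith('-- TEST '):
--             if current_name:
--                 tests.append((current_name, '\n'.join(current_sql)))
--             # Extract test name from "-- TEST N: description"
--             current_name = line[3:].strip()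
--             current_sql = []
--         elif current_name:
--             # Skip comment lines that are part of expected results
--             if not line.startswith('--'):
--                 current_sql.append(line)
--
--     if current_name:
--         tests.append((current_name, '\n'.join(current_sql)))
--
--     return tests
-- ===== SOURCE B (Python) =====
-- def extract_tests(sql: str) -> list[tuple[str, str]]:
--     """Extract individual tests from SQL file.
--
--     Index-based re-implementation: locate each '-- TEST ' header line,
--     pair it with the next header (or end of input) to delimit its segment,
--     and build the body from the segment's non-'--' lines.
--     """
--     lines = sql.split('\n')
--     n = len(lines)
--     out = []
--     i = 0
--     # skip everything before the first header
--     while i < n and not lines[i].startswith('-- TEST '):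
--         i += 1
--     while i < n:  # lines[i] is a header line
--         j = i + 1
--         while j < n and not lines[j].startswith('-- TEST '):
--             j += 1
--         body = '\n'.join(l for l in lines[i + 1:j] if not l.startswith('--'))
--         out.append((lines[i][3:].strip(), body))
--         i = j
--     return out
-- ===== Notes on version B (the rewrite author's own statement) =====
-- stated objective: alternative
-- what changed: Replaced A's single-pass state machine (current_name/current_sql accumulators with a final flush) by a boundary-indexing decomposition: scan forward to each '-- TEST ' header position, pair it with the next header (or end of input) to delimit its segment, and build each (name, body) pair directly from that slice.
import Mathlib
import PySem

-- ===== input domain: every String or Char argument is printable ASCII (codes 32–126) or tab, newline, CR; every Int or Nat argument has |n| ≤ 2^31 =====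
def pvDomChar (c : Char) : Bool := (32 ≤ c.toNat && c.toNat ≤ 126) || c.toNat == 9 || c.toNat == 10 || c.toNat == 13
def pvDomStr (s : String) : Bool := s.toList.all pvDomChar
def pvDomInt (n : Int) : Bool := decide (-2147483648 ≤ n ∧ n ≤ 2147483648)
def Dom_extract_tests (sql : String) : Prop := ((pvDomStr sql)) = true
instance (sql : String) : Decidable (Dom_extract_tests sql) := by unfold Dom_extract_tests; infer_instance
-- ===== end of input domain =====

-- B replaces A's accumulator state machine by a boundary-indexing scan over header positions;
-- the return values agree on every input (both programs are total).

-- ===== PORT A =====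
-- A's for-loop is a foldl over sql.split('\n') with state (tests, current_name, current_sql);
-- `if current_name:` is Python string truthiness on Optional[str]: some name with name ≠ "".
def pvTruthy (o : Option String) : Bool :=
  match o with
  | none => false
  | some s => !(s == "")

def pvAStep (st : List (String × String) × Option String × List String) (line : String) :
    List (String × String) × Option String × List String :=
  let (tests, curName, curSql) := st
  if PySem.Str.startswith line "-- TEST " then
    let tests' := if pvTruthy curName then
        tests ++ [(curName.getD "", PySem.Str.join "\n" curSql)] else tests
    (tests', some (PySem.Str.strip (PySem.Str.slice line (some 3) none)), [])
  else if pvTruthy curName then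
    if !(PySem.Str.startswith line "--") then (tests, curName, curSql ++ [line])
    else (tests, curName, curSql)
  else (tests, curName, curSql)

def extract_tests (sql : String) : List (String × String) :=
  let lines := (PySem.Str.split? sql "\n").getD []   -- sep "\n" ≠ "", so split? is always `some`
  let st := lines.foldl pvAStep ([], none, [])
  if pvTruthy st.2.1 then st.1 ++ [(st.2.1.getD "", PySem.Str.join "\n" st.2.2)] else st.1

-- ===== PORT B =====
def pvIsHeader (l : String) : Bool := PySem.Str.startswith l "-- TEST "

-- the inner `while j < n and not lines[j].startswith('-- TEST '): j += 1` scan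
def pvNextHdr (lines : List String) (j : Nat) : Nat :=
  if h : j < lines.length ∧ ¬ pvIsHeader (lines.getD j "") then pvNextHdr lines (j + 1) else j
termination_by lines.length - j
decreasing_by omega

-- needed by pvBLoop's termination proof
theorem pvNextHdr_ge (lines : List String) (j : Nat) : j ≤ pvNextHdr lines j := by
  refine pvNextHdr.induct lines (fun j => j ≤ pvNextHdr lines j) ?_ ?_ j
  · intro x h ih; rw [pvNextHdr, dif_pos h]; omega
  · intro x h; rw [pvNextHdr, dif_neg h]

-- the outer `while i < n:` loop; extract_tests_alt only calls it with i a header position or n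
def pvBLoop (lines : List String) (i : Nat) : List (String × String) :=
  if h : i < lines.length then
    let j := pvNextHdr lines (i + 1)
    let body := PySem.Str.join "\n"
      ((PySem.List.slice lines (some ((i + 1 : Nat) : Int)) (some (j : Int))).filter
        (fun x => !PySem.Str.startswith x "--"))
    (PySem.Str.strip (PySem.Str.slice (lines.getD i "") (some 3) none), body) :: pvBLoop lines j
  else []
termination_by lines.length - i
decreasing_by
  have := pvNextHdr_ge lines (i + 1)
  omega

def extract_tests_alt (sql : String) : List (String × String) :=
  let lines := (PySem.Str.split? sql "\n").getD []
  pvBLoop lines (pvNextHdr lines 0)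

-- ===== PRECONDITION & SPEC =====
def Spec_extract_tests (sql : String) (out : List (String × String)) : Prop := out = extract_tests_alt sql
instance (sql : String) (out : List (String × String)) : Decidable (Spec_extract_tests sql out) := by unfold Spec_extract_tests; infer_instance

-- ===== CLAIM (what is proved, stated in full; the proofs are below) =====
def Claim_equal_extract_tests : Prop := ∀ (sql : String), Dom_extract_tests sql → Spec_extract_tests sql (extract_tests sql)

-- ===== LEMMAS AND PROOFS =====

-- proof-side helpers: the common segment decomposition both programs compute
def pvName (l : String) : String := PySem.Str.strip (PySem.Str.slice l (some 3) none)

def pvSegs : List String → List (String × String)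
  | [] => []
  | l :: ls =>
    if pvIsHeader l then
      (pvName l,
        PySem.Str.join "\n"
          ((ls.takeWhile (fun x => !pvIsHeader x)).filter (fun x => !PySem.Str.startswith x "--")))
        :: pvSegs (ls.dropWhile (fun x => !pvIsHeader x))
    else pvSegs ls
termination_by ls => ls.length
decreasing_by
  · exact Nat.lt_succ_of_le (List.length_dropWhile_le _ _)
  · exact Nat.lt_succ_self _

def pvFinish (st : List (String × String) × Option String × List String) : List (String × String) :=
  if pvTruthy st.2.1 then st.1 ++ [(st.2.1.getD "", PySem.Str.join "\n" st.2.2)] else st.1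

-- a stored test name comes from a header line, so it starts with 'T' after strip and is nonempty
theorem pvName_ne_empty (l : String) (h : pvIsHeader l = true) : pvName l ≠ "" := by
  have hpre : "-- TEST ".toList <+: l.toList := by
    have hiff := PySem.Chars.startswith_iff (s := l.toList) (p := "-- TEST ".toList)
    simp only [pvIsHeader] at h
    rw [PySem.Str.startswith_eq] at h
    exact hiff.mp h
  obtain ⟨r, hr⟩ := hpre
  intro hc
  have hlist : (pvName l).toList = [] := by rw [hc]; rfl
  simp only [pvName, PySem.Str.toList_strip, PySem.Str.toList_slice,
    PySem.Chars.slice_eq_listSlice, PySem.List.slice_from l.toList (a := 3) (by omega)] at hlist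
  rw [← hr] at hlist
  have hdrop : ("-- TEST ".toList ++ r).drop (Int.toNat 3) = 'T' :: 'E' :: 'S' :: 'T' :: ' ' :: r := rfl
  rw [hdrop] at hlist
  simp only [PySem.Chars.strip, PySem.Chars.lstrip, PySem.Chars.rstrip,
    List.dropWhile_cons_of_neg (by decide : ¬ PySem.Chars.isspace 'T' = true),
    List.reverse_eq_nil_iff, List.dropWhile_eq_nil_iff] at hlist
  have := hlist 'T' (by simp)
  exact absurd this (by decide)

theorem pvFoldA_some (ls : List String) (t : List (String × String)) (nm : String)
    (cs : List String) (hnm : ∃ l0, pvIsHeader l0 = true ∧ nm = pvName l0) :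
    pvFinish (ls.foldl pvAStep (t, some nm, cs)) =
      t ++ (nm, PySem.Str.join "\n"
            (cs ++ (ls.takeWhile (fun x => !pvIsHeader x)).filter
                (fun x => !PySem.Str.startswith x "--")))
        :: pvSegs (ls.dropWhile (fun x => !pvIsHeader x)) := by
  revert hnm
  induction ls generalizing t nm cs with
  | nil =>
      rintro ⟨l0, hl0, rfl⟩
      have ht : pvTruthy (some (pvName l0)) = true := by
        simp [pvTruthy, pvName_ne_empty l0 hl0]
      simp [pvFinish, ht, pvSegs]
  | cons l ls ih =>
      rintro ⟨l0, hl0, rfl⟩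
      have ht : pvTruthy (some (pvName l0)) = true := by
        simp [pvTruthy, pvName_ne_empty l0 hl0]
      by_cases hl : pvIsHeader l
      · have hstep : pvAStep (t, some (pvName l0), cs) l =
            (t ++ [(pvName l0, PySem.Str.join "\n" cs)], some (pvName l), []) := by
          simp only [pvIsHeader] at hl
          simp only [pvAStep]
          rw [if_pos hl, if_pos ht]
          simp [pvName]
        rw [List.foldl_cons, hstep,
            ih _ _ _ ⟨l, by simpa [pvIsHeader] using hl, rfl⟩,
            List.takeWhile_cons_of_neg (by simp [hl]),
            List.dropWhile_cons_of_neg (by simp [hl]), pvSegs, if_pos hl]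
        simp
      · have hnh : ¬ PySem.Str.startswith l "-- TEST " = true := by simpa [pvIsHeader] using hl
        by_cases hc : PySem.Str.startswith l "--"
        · have hc' : PySem.Chars.startswith l.toList ['-', '-'] = true := by simpa using hc
          have hstep : pvAStep (t, some (pvName l0), cs) l = (t, some (pvName l0), cs) := by
            simp only [pvAStep]
            rw [if_neg hnh, if_pos ht, if_neg (by rw [hc]; decide)]
          rw [List.foldl_cons, hstep, ih _ _ _ ⟨l0, hl0, rfl⟩,
              List.takeWhile_cons_of_pos (by simp [hl]),
              List.dropWhile_cons_of_pos (by simp [hl])]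
          simp [hc']
        · have hcf : PySem.Str.startswith l "--" = false := by simpa using hc
          have hc' : PySem.Chars.startswith l.toList ['-', '-'] = false := by simpa using hcf
          have hstep : pvAStep (t, some (pvName l0), cs) l = (t, some (pvName l0), cs ++ [l]) := by
            simp only [pvAStep]
            rw [if_neg hnh, if_pos ht, if_pos (by rw [hcf]; decide)]
          rw [List.foldl_cons, hstep, ih _ _ _ ⟨l0, hl0, rfl⟩,
              List.takeWhile_cons_of_pos (by simp [hl]),
              List.dropWhile_cons_of_pos (by simp [hl])]
          simp [hc']

theorem pvFoldA_none (ls : List String) (t : List (String × String)) (cs : List String) :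
    pvFinish (ls.foldl pvAStep (t, none, cs)) = t ++ pvSegs ls := by
  induction ls generalizing cs with
  | nil => simp [pvFinish, pvTruthy, pvSegs]
  | cons l ls ih =>
      by_cases hl : pvIsHeader l
      · have hstep : pvAStep (t, none, cs) l = (t, some (pvName l), []) := by
          simp only [pvIsHeader] at hl
          simp only [pvAStep]
          rw [if_pos hl, if_neg (by decide)]
          rfl
        rw [List.foldl_cons, hstep, pvFoldA_some ls _ _ _ ⟨l, hl, rfl⟩, pvSegs, if_pos hl]
        simp
      · have hnh : ¬ PySem.Str.startswith l "-- TEST " = true := by simpa [pvIsHeader] using hl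
        have hstep : pvAStep (t, none, cs) l = (t, none, cs) := by
          simp only [pvAStep]
          rw [if_neg hnh, if_neg (by decide)]
        rw [List.foldl_cons, hstep, ih, pvSegs, if_neg hl]

theorem pvNextHdr_char (lines : List String) (j : Nat) :
    pvNextHdr lines j = j + ((lines.drop j).takeWhile (fun x => !pvIsHeader x)).length := by
  refine pvNextHdr.induct lines
    (fun j => pvNextHdr lines j = j + ((lines.drop j).takeWhile (fun x => !pvIsHeader x)).length) ?_ ?_ j
  · intro x h ih
    rw [pvNextHdr, dif_pos h, ih, List.drop_eq_getElem_cons h.1,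
        List.takeWhile_cons_of_pos (by simp [List.getElem?_eq_getElem h.1] at h; simp [h.2])]
    simp; omega
  · intro x h
    rw [pvNextHdr, dif_neg h]
    rcases Nat.lt_or_ge x lines.length with hx | hx
    · have hh : pvIsHeader lines[x] = true := by
        by_contra hc
        exact h ⟨hx, by simp [List.getElem?_eq_getElem hx, hc]⟩
      rw [List.drop_eq_getElem_cons hx, List.takeWhile_cons_of_neg (by simp [hh])]
      simp
    · rw [List.drop_eq_nil_of_le hx]; simp

theorem pvTake_takeWhile {α : Type} (p : α → Bool) (l : List α) :
    l.take (l.takeWhile p).length = l.takeWhile p :=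
  (List.prefix_iff_eq_take.mp (List.takeWhile_prefix p)).symm

theorem pvDropWhile_eq_drop {α : Type} (p : α → Bool) (l : List α) :
    l.dropWhile p = l.drop (l.takeWhile p).length := by
  induction l with
  | nil => rfl
  | cons a l ih =>
      by_cases h : p a
      · simpa [h] using ih
      · simp [h]

theorem pvTakeWhile_dropWhile {α : Type} (p : α → Bool) (l : List α) :
    (l.dropWhile p).takeWhile p = [] := by
  induction l with
  | nil => rfl
  | cons a l ih =>
      by_cases h : p a
      · simpa [h] using ih
      · simp [h]

theorem pvBLoop_eq_segs (lines : List String) (k : Nat) : ∀ i, lines.length - i ≤ k →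
    pvBLoop lines (pvNextHdr lines i) = pvSegs (lines.drop i) := by
  induction k with
  | zero =>
      intro i hi
      have hx : lines.length ≤ i := by omega
      have hn : pvNextHdr lines i = i := by
        rw [pvNextHdr_char, List.drop_eq_nil_of_le hx]; simp
      rw [List.drop_eq_nil_of_le hx, hn, pvBLoop, dif_neg (by omega), pvSegs]
  | succ k ih =>
      intro i hi
      rcases Nat.lt_or_ge i lines.length with hx | hx
      · by_cases hh : pvIsHeader lines[i]
        · -- header at position i
          have hn : pvNextHdr lines i = i := by
            rw [pvNextHdr_char, List.drop_eq_getElem_cons hx,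
                List.takeWhile_cons_of_neg (by simp [hh])]
            simp
          set j := pvNextHdr lines (i + 1) with hj
          have hjchar : j = (i + 1) + ((lines.drop (i+1)).takeWhile (fun x => !pvIsHeader x)).length :=
            pvNextHdr_char lines (i + 1)
          have hge : i + 1 ≤ j := pvNextHdr_ge lines (i + 1)
          have hslice : PySem.List.slice lines (some ((i + 1 : Nat) : Int)) (some (j : Int)) =
              (lines.drop (i+1)).takeWhile (fun x => !pvIsHeader x) := by
            rw [PySem.List.slice_natCast, hjchar]
            simp [pvTake_takeWhile]
          have hdropj : lines.drop j = (lines.drop (i+1)).dropWhile (fun x => !pvIsHeader x) := by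
            rw [pvDropWhile_eq_drop, List.drop_drop, hjchar]
          have hidem : pvNextHdr lines j = j := by
            rw [pvNextHdr_char, hdropj, pvTakeWhile_dropWhile]; simp
          have htail : pvBLoop lines j = pvSegs (lines.drop j) := by
            have h0 := ih j (by omega)
            rwa [hidem] at h0
          rw [hn, pvBLoop, dif_pos hx, List.drop_eq_getElem_cons hx, pvSegs, if_pos hh]
          simp only [← hj, hslice, htail, hdropj, List.getD_eq_getElem _ _ hx]
          rfl
        · -- no header at position i
          have hn : pvNextHdr lines i = pvNextHdr lines (i + 1) := by
            rw [pvNextHdr_char lines i, pvNextHdr_char lines (i+1), List.drop_eq_getElem_cons hx,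
                List.takeWhile_cons_of_pos (by simp [hh])]
            simp; omega
          rw [hn, List.drop_eq_getElem_cons hx, pvSegs, if_neg hh]
          exact ih (i + 1) (by omega)
      · have hn : pvNextHdr lines i = i := by
          rw [pvNextHdr_char, List.drop_eq_nil_of_le hx]; simp
        rw [List.drop_eq_nil_of_le hx, hn, pvBLoop, dif_neg (by omega), pvSegs]

-- ===== VERDICT (by name: the statement is the Claim_ definition above) =====
theorem extract_tests_spec : Claim_equal_extract_tests := by
  intro sql _
  unfold Spec_extract_tests extract_tests extract_tests_alt
  have h1 := pvFoldA_none ((PySem.Str.split? sql "\n").getD []) [] []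
  have h2 := pvBLoop_eq_segs ((PySem.Str.split? sql "\n").getD [])
      ((PySem.Str.split? sql "\n").getD []).length 0 (by omega)
  simp only [List.drop_zero] at h2
  simpa [pvFinish] using h1.trans (by simpa using h2.symm)
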